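-- pv_equiv track=rewrite | github.com/pypi-data/pypi-mirror-395 | packages/pypi-info/pypi_info-0.61.5.tar.gz/pypi_info-0.61.5/pypi_info/gui_qt5.py | style_markdown_html
-- ===== SOURCE A (Python) =====
-- def style_markdown_html(html: str) -> str:
--     """Apply custom CSS styling to markdown HTML elements."""
--     # Replace default styling with our custom colors
--     styling_replacements = [
--         ('<h1>', '<h1 style="color: #00FFFF; margin: 15px 0 10px 0;">'),
--         ('<h2>', '<h2 style="color: #00FFFF; margin: 12px 0 8px 0;">'),
--         ('<h3>', '<h3 style="color: #AAAAFF; margin: 10px 0 6px 0;">'),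
--         ('<h4>', '<h4 style="color: #AAAAFF; margin: 8px 0 4px 0;">'),
--         ('<h5>', '<h5 style="color: #AAAAFF; margin: 6px 0 3px 0;">'),
--         ('<h6>', '<h6 style="color: #AAAAFF; margin: 4px 0 2px 0;">'),
--         ('<p>', '<p style="color: #00FFFF; margin: 8px 0; line-height: 1.4;">'),
--         ('<li>', '<li style="color: #00FFFF; margin: 2px 0;">'),
--         # ('<code>', '<code style="background-color: #333333; color: #FFFF00; padding: 2px 4px; border-radius: 3px;">'),
--         ('<code>', '<code style="background-color: #333333; color: #FFFF00; padding: 2px 4px; border-radius: 3px; white-space: pre-wrap; word-wrap: break-word;">'),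
--         # ('<pre>', '<pre style="background-color: #1a1a1a; color: #00FFFF; padding: 10px; border-radius: 5px; border: 1px solid #333333; overflow-x: auto;">'),
--         ('<pre>', '<pre style="background-color: #1a1a1a; color: #00FFFF; padding: 10px; border-radius: 5px; border: 1px solid #333333; white-space: pre-wrap; word-wrap: break-word; overflow-x: hidden;">'),
--         ('<blockquote>', '<blockquote style="border-left: 4px solid #0078AA; padding-left: 10px; margin: 10px 0; color: #AAAAFF; font-style: italic;">'),
--         ('<a ', '<a style="color: #0078AA; text-decoration: underline;" '),
--         ('<table>', '<table style="border-collapse: collapse; margin: 10px 0; color: #00FFFF;">'),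
--         ('<th>', '<th style="border: 1px solid #333333; padding: 8px; background-color: #333333; color: #FFFF00;">'),
--         ('<td>', '<td style="border: 1px solid #333333; padding: 6px;">'),
--         ('<hr>', '<hr style="border: none; border-top: 2px solid #333333; margin: 15px 0;">'),
--     ]
--
--     for old, new in styling_replacements:
--         html = html.replace(old, new)
--
--     return html
-- ===== SOURCE B (Python) =====
-- import re
--
-- _STYLED = {
--     '<h1>': '<h1 style="color: #00FFFF; margin: 15px 0 10px 0;">',
--     '<h2>': '<h2 style="color: #00FFFF; margin: 12px 0 8px 0;">',
--     '<h3>': '<h3 style="color: #AAAAFF; margin: 10px 0 6px 0;">',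
--     '<h4>': '<h4 style="color: #AAAAFF; margin: 8px 0 4px 0;">',
--     '<h5>': '<h5 style="color: #AAAAFF; margin: 6px 0 3px 0;">',
--     '<h6>': '<h6 style="color: #AAAAFF; margin: 4px 0 2px 0;">',
--     '<p>': '<p style="color: #00FFFF; margin: 8px 0; line-height: 1.4;">',
--     '<li>': '<li style="color: #00FFFF; margin: 2px 0;">',
--     '<code>': '<code style="background-color: #333333; color: #FFFF00; padding: 2px 4px; border-radius: 3px; white-space: pre-wrap; word-wrap: break-word;">',
--     '<pre>': '<pre style="background-color: #1a1a1a; color: #00FFFF; padding: 10px; border-radius: 5px; border: 1px solid #333333; white-space: pre-wrap; word-wrap: break-word; overflow-x: hidden;">',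
--     '<blockquote>': '<blockquote style="border-left: 4px solid #0078AA; padding-left: 10px; margin: 10px 0; color: #AAAAFF; font-style: italic;">',
--     '<a ': '<a style="color: #0078AA; text-decoration: underline;" ',
--     '<table>': '<table style="border-collapse: collapse; margin: 10px 0; color: #00FFFF;">',
--     '<th>': '<th style="border: 1px solid #333333; padding: 8px; background-color: #333333; color: #FFFF00;">',
--     '<td>': '<td style="border: 1px solid #333333; padding: 6px;">',
--     '<hr>': '<hr style="border: none; border-top: 2px solid #333333; margin: 15px 0;">',
-- }
--
-- _TAG_RE = re.compile('|'.join(re.escape(tag) for tag in _STYLED))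
--
--
-- def style_markdown_html(html: str) -> str:
--     """Apply custom CSS styling to markdown HTML elements in one pass."""
--     return _TAG_RE.sub(lambda m: _STYLED[m.group(0)], html)
-- ===== Notes on version B (the rewrite author's own statement) =====
-- stated objective: idiomatic
-- what changed: Replaces the chain of 16 sequential str.replace passes (16 intermediate strings) with one precompiled regex alternation over the escaped tag tokens and a single re.sub pass with a dict lookup for each match.
import Mathlib
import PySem

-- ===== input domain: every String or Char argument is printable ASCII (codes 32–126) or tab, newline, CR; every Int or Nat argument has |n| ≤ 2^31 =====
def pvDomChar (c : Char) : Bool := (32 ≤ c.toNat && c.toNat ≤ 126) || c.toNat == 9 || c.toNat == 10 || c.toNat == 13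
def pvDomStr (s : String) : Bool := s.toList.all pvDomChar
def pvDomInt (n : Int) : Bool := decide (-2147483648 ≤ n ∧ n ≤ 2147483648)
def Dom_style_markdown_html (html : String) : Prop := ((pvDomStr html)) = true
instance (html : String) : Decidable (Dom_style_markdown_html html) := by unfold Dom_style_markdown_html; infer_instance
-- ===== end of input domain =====

-- B replaces A's chain of 16 sequential str.replace passes by a single left-to-right scan
-- (a precompiled regex alternation with a dict lookup in Python); return values proved equal on Dom.


-- ===== PORT A =====
-- literal transliteration: the list of pairs, then the for-loop as a foldl of str.replace
def style_markdown_html (html : String) : String :=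
  let styling_replacements : List (String × String) := [
    ("<h1>", "<h1 style=\"color: #00FFFF; margin: 15px 0 10px 0;\">"),
    ("<h2>", "<h2 style=\"color: #00FFFF; margin: 12px 0 8px 0;\">"),
    ("<h3>", "<h3 style=\"color: #AAAAFF; margin: 10px 0 6px 0;\">"),
    ("<h4>", "<h4 style=\"color: #AAAAFF; margin: 8px 0 4px 0;\">"),
    ("<h5>", "<h5 style=\"color: #AAAAFF; margin: 6px 0 3px 0;\">"),
    ("<h6>", "<h6 style=\"color: #AAAAFF; margin: 4px 0 2px 0;\">"),
    ("<p>", "<p style=\"color: #00FFFF; margin: 8px 0; line-height: 1.4;\">"),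
    ("<li>", "<li style=\"color: #00FFFF; margin: 2px 0;\">"),
    ("<code>", "<code style=\"background-color: #333333; color: #FFFF00; padding: 2px 4px; border-radius: 3px; white-space: pre-wrap; word-wrap: break-word;\">"),
    ("<pre>", "<pre style=\"background-color: #1a1a1a; color: #00FFFF; padding: 10px; border-radius: 5px; border: 1px solid #333333; white-space: pre-wrap; word-wrap: break-word; overflow-x: hidden;\">"),
    ("<blockquote>", "<blockquote style=\"border-left: 4px solid #0078AA; padding-left: 10px; margin: 10px 0; color: #AAAAFF; font-style: italic;\">"),
    ("<a ", "<a style=\"color: #0078AA; text-decoration: underline;\" "),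
    ("<table>", "<table style=\"border-collapse: collapse; margin: 10px 0; color: #00FFFF;\">"),
    ("<th>", "<th style=\"border: 1px solid #333333; padding: 8px; background-color: #333333; color: #FFFF00;\">"),
    ("<td>", "<td style=\"border: 1px solid #333333; padding: 6px;\">"),
    ("<hr>", "<hr style=\"border: none; border-top: 2px solid #333333; margin: 15px 0;\">")]
  styling_replacements.foldl (fun h p => PySem.Str.replace h p.1 p.2) html

-- ===== PORT B =====
-- Source B's _STYLED table (same insertion order), keys and values as char lists
def pvTagTable : List (List Char × List Char) := [
  ("<h1>".toList, "<h1 style=\"color: #00FFFF; margin: 15px 0 10px 0;\">".toList),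
  ("<h2>".toList, "<h2 style=\"color: #00FFFF; margin: 12px 0 8px 0;\">".toList),
  ("<h3>".toList, "<h3 style=\"color: #AAAAFF; margin: 10px 0 6px 0;\">".toList),
  ("<h4>".toList, "<h4 style=\"color: #AAAAFF; margin: 8px 0 4px 0;\">".toList),
  ("<h5>".toList, "<h5 style=\"color: #AAAAFF; margin: 6px 0 3px 0;\">".toList),
  ("<h6>".toList, "<h6 style=\"color: #AAAAFF; margin: 4px 0 2px 0;\">".toList),
  ("<p>".toList, "<p style=\"color: #00FFFF; margin: 8px 0; line-height: 1.4;\">".toList),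
  ("<li>".toList, "<li style=\"color: #00FFFF; margin: 2px 0;\">".toList),
  ("<code>".toList, "<code style=\"background-color: #333333; color: #FFFF00; padding: 2px 4px; border-radius: 3px; white-space: pre-wrap; word-wrap: break-word;\">".toList),
  ("<pre>".toList, "<pre style=\"background-color: #1a1a1a; color: #00FFFF; padding: 10px; border-radius: 5px; border: 1px solid #333333; white-space: pre-wrap; word-wrap: break-word; overflow-x: hidden;\">".toList),
  ("<blockquote>".toList, "<blockquote style=\"border-left: 4px solid #0078AA; padding-left: 10px; margin: 10px 0; color: #AAAAFF; font-style: italic;\">".toList),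
  ("<a ".toList, "<a style=\"color: #0078AA; text-decoration: underline;\" ".toList),
  ("<table>".toList, "<table style=\"border-collapse: collapse; margin: 10px 0; color: #00FFFF;\">".toList),
  ("<th>".toList, "<th style=\"border: 1px solid #333333; padding: 8px; background-color: #333333; color: #FFFF00;\">".toList),
  ("<td>".toList, "<td style=\"border: 1px solid #333333; padding: 6px;\">".toList),
  ("<hr>".toList, "<hr style=\"border: none; border-top: 2px solid #333333; margin: 15px 0;\">".toList)]

-- first table entry whose (non-empty) key is a prefix of s — exactly which alternative
-- of Source B's literal regex alternation matches at the current position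
def pvFindRepl (tbl : List (List Char × List Char)) (s : List Char) : Option (List Char × List Char) :=
  tbl.find? (fun e => !e.1.isEmpty && e.1.isPrefixOf s)

-- hand port of re.sub with a pattern that is an alternation of escaped literals: one
-- left-to-right pass, at each position the first matching alternative is replaced and
-- skipped, otherwise the character is copied (exact for such a pattern)
def pvScan (tbl : List (List Char × List Char)) : List Char → List Char
  | [] => []
  | c :: cs =>
    match pvFindRepl tbl (c :: cs) with
    | some (k, r) => r ++ pvScan tbl (cs.drop (k.length - 1))
    | none => c :: pvScan tbl cs
  termination_by s => s.length
  decreasing_by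
  all_goals simp [List.length_drop]

def style_markdown_html_alt (html : String) : String :=
  String.ofList (pvScan pvTagTable html.toList)

-- ===== PRECONDITION & SPEC =====
def Spec_style_markdown_html (html : String) (out : String) : Prop := out = style_markdown_html_alt html
instance (html : String) (out : String) : Decidable (Spec_style_markdown_html html out) := by unfold Spec_style_markdown_html; infer_instance

-- ===== CLAIM (what is proved, stated in full; the proofs are below) =====
def Claim_equal_style_markdown_html : Prop := ∀ (html : String), Dom_style_markdown_html html → Spec_style_markdown_html html (style_markdown_html html)

-- ===== LEMMAS AND PROOFS =====

-- side conditions on the concrete table that make the 16 sequential replaces fuse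
-- into one scan (Bool-valued so `decide` can discharge them on the literal table)
def pvGoodKeyB (k : List Char) : Bool :=
  k.head? == some '<' && !k.tail.contains '<'
def pvGoodEntryB (k : List Char) (e : List Char × List Char) : Bool :=
  e.1.head? == some '<' && e.2.head? == some '<' && !e.2.tail.contains '<' &&
    decide (k.length ≤ e.2.length) && !k.isPrefixOf e.2
def pvGoodB (tbl : List (List Char × List Char)) (k : List Char) : Bool :=
  pvGoodKeyB k && tbl.all (pvGoodEntryB k)
def pvGoodChainB : List (List Char × List Char) → List (List Char × List Char) → Bool
  | _, [] => true
  | T, e :: rest => pvGoodB T e.1 && pvGoodChainB (T ++ [e]) rest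

-- unfolding equations for pvScan
theorem pvScan_nil (tbl : List (List Char × List Char)) : pvScan tbl [] = [] := by
  rw [pvScan.eq_def]

theorem pvScan_cons_some (tbl : List (List Char × List Char)) (c : Char) (cs k r : List Char)
    (h : pvFindRepl tbl (c :: cs) = some (k, r)) :
    pvScan tbl (c :: cs) = r ++ pvScan tbl (cs.drop (k.length - 1)) := by
  rw [pvScan.eq_def]; simp only [h]

theorem pvScan_cons_none (tbl : List (List Char × List Char)) (c : Char) (cs : List Char)
    (h : pvFindRepl tbl (c :: cs) = none) :
    pvScan tbl (c :: cs) = c :: pvScan tbl cs := by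
  rw [pvScan.eq_def]; simp only [h]

-- PySem.Chars.replace with a non-empty needle IS the one-key scan
theorem pvFindRepl_singleton_pos (s old new : List Char) (hold : old.isEmpty = false)
    (hpre : old.isPrefixOf s = true) :
    pvFindRepl [(old, new)] s = some (old, new) := by
  simp [pvFindRepl, List.find?, hold, hpre]

theorem pvFindRepl_singleton_neg (s old new : List Char)
    (hpre : old.isPrefixOf s = false) :
    pvFindRepl [(old, new)] s = none := by
  simp [pvFindRepl, List.find?, hpre]

theorem pvReplace_go_spec (old new : List Char) (hold : old.isEmpty = false) :
    ∀ fuel l acc, l.length ≤ fuel →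
      PySem.Chars.replace.go old new fuel l acc = acc.reverse ++ pvScan [(old, new)] l := by
  have holdlen : 1 ≤ old.length := by
    cases old with
    | nil => simp [List.isEmpty] at hold
    | cons o ot => simp
  intro fuel
  induction fuel with
  | zero =>
    intro l acc hl
    have : l = [] := List.eq_nil_of_length_eq_zero (Nat.le_zero.mp hl)
    subst this
    simp [pvScan_nil, PySem.Chars.replace.go.eq_def]
  | succ n ih =>
    intro l acc hl
    cases l with
    | nil =>
      rw [pvScan_nil, PySem.Chars.replace.go.eq_def]
      simp
    | cons c t =>
      rw [PySem.Chars.replace.go.eq_def]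
      simp only []
      by_cases hpre : old.isPrefixOf (c :: t) = true
      · rw [if_pos hpre]
        rw [ih (List.drop old.length (c :: t)) (new.reverse ++ acc)
              (by simp [List.length_drop] at hl ⊢; omega)]
        rw [pvScan_cons_some [(old, new)] c t old new
              (pvFindRepl_singleton_pos _ _ _ hold hpre)]
        have hdrop : List.drop old.length (c :: t) = List.drop (old.length - 1) t := by
          conv_lhs => rw [show old.length = (old.length - 1) + 1 from by omega]
          rw [List.drop_succ_cons]
        rw [hdrop]
        simp
      · rw [if_neg hpre]
        rw [ih t (c :: acc) (by simp at hl; omega)]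
        rw [pvScan_cons_none [(old, new)] c t
              (pvFindRepl_singleton_neg _ _ _ (Bool.eq_false_iff.mpr hpre))]
        simp

theorem pvReplace_eq_scan (s old new : List Char) (hold : old.isEmpty = false) :
    PySem.Chars.replace s old new = pvScan [(old, new)] s := by
  rw [PySem.Chars.replace, if_neg (by simp [hold])]
  have := pvReplace_go_spec old new hold s.length s [] le_rfl
  simpa using this

theorem pvFindRepl_none_of_head (tbl : List (List Char × List Char)) (s : List Char)
    (h : ∀ e ∈ tbl, e.1.head? = some '<') (hs : s.head? ≠ some '<') :
    pvFindRepl tbl s = none := by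
  apply List.find?_eq_none.mpr
  intro e he hcontra
  simp only [Bool.and_eq_true, Bool.not_eq_true'] at hcontra
  obtain ⟨-, hpre⟩ := hcontra
  have hpre' := List.isPrefixOf_iff_prefix.mp hpre
  have hhead := h e he
  cases hk : e.1 with
  | nil => rw [hk] at hhead; simp at hhead
  | cons a t =>
    rw [hk] at hhead hpre'
    have ha : a = '<' := by simpa using hhead
    obtain ⟨w, hw⟩ := hpre'
    apply hs
    rw [← hw, ha]
    simp

-- characters other than '<' pass through the scan untouched
theorem pvScan_pass (tbl : List (List Char × List Char))
    (h : ∀ e ∈ tbl, e.1.head? = some '<') :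
    ∀ u x, '<' ∉ u → pvScan tbl (u ++ x) = u ++ pvScan tbl x := by
  intro u
  induction u with
  | nil => simp
  | cons a u' ih =>
    intro x hu
    have ha : a ≠ '<' := by
      intro hcontra; exact hu (by simp [hcontra])
    have hn : pvFindRepl tbl (a :: (u' ++ x)) = none :=
      pvFindRepl_none_of_head tbl _ h (by simpa using ha)
    rw [List.cons_append, pvScan_cons_none tbl a (u' ++ x) hn,
        ih x (fun hm => hu (List.mem_cons_of_mem _ hm))]
    simp

theorem pvPrefix_append_absorb (k rm x : List Char) (hlen : k.length ≤ rm.length) :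
    k <+: rm ++ x ↔ k <+: rm :=
  List.isPrefix_append_of_length hlen

-- the one-key scan skips over a previously inserted replacement text
theorem pvScan_skip (k r rm x : List Char) (hk : k.head? = some '<')
    (hrm : rm.head? = some '<') (hrmt : '<' ∉ rm.tail)
    (hnp : ¬ k <+: rm) (hlen : k.length ≤ rm.length) :
    pvScan [(k, r)] (rm ++ x) = rm ++ pvScan [(k, r)] x := by
  cases hrmc : rm with
  | nil => rw [hrmc] at hrm; simp at hrm
  | cons b rmt =>
    subst hrmc
    have hb : b = '<' := by simpa using hrm
    subst hb
    have hnot : ¬ k <+: ('<' :: rmt) ++ x :=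
      fun hc => hnp ((pvPrefix_append_absorb k _ x hlen).mp hc)
    have hf : pvFindRepl [(k, r)] (('<' :: rmt) ++ x) = none := by
      apply pvFindRepl_singleton_neg
      rw [Bool.eq_false_iff]
      intro hc
      exact hnot (List.isPrefixOf_iff_prefix.mp hc)
    rw [List.cons_append, pvScan_cons_none [(k, r)] '<' (rmt ++ x) (by rw [← List.cons_append]; exact hf)]
    rw [pvScan_pass [(k, r)] (by simp [hk]) rmt x (by simpa using hrmt)]
    simp

-- a key absent from v stays absent from the scanned v
theorem pvScan_noMatch (tbl : List (List Char × List Char))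
    (h : ∀ e ∈ tbl, e.1.head? = some '<' ∧ e.2.head? = some '<') :
    ∀ v u, '<' ∉ u → ¬ u <+: v → ¬ u <+: pvScan tbl v := by
  intro v
  induction v with
  | nil =>
    intro u hu hnp
    rw [pvScan_nil]
    exact hnp
  | cons b v' ih =>
    intro u hu hnp
    cases u with
    | nil => exact absurd (List.nil_prefix) hnp
    | cons a u' =>
      have ha : a ≠ '<' := fun hc => hu (by simp [hc])
      cases hf : pvFindRepl tbl (b :: v') with
      | some e =>
        obtain ⟨k0, rm⟩ := e
        rw [pvScan_cons_some tbl b v' k0 rm hf]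
        have hrm : rm.head? = some '<' := (h _ (List.mem_of_find?_eq_some hf)).2
        cases hrmc : rm with
        | nil => rw [hrmc] at hrm; simp at hrm
        | cons rb rmt =>
          rw [hrmc] at hrm
          have : rb = '<' := by simpa using hrm
          subst this
          intro hc
          rw [List.cons_append] at hc
          exact ha (List.cons_prefix_cons.mp hc).1
      | none =>
        rw [pvScan_cons_none tbl b v' hf]
        intro hc
        obtain ⟨hab, hc'⟩ := List.cons_prefix_cons.mp hc
        subst hab
        have hnp' : ¬ u' <+: v' := fun hp => hnp (List.cons_prefix_cons.mpr ⟨rfl, hp⟩)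
        exact ih u' (fun hm => hu (List.mem_cons_of_mem _ hm)) hnp' hc'

-- FUSION: running one more key over the scan's output = scanning with the key appended
theorem pvFuse (tbl : List (List Char × List Char)) (k r : List Char)
    (hg : pvGoodB tbl k = true) :
    ∀ s, pvScan [(k, r)] (pvScan tbl s) = pvScan (tbl ++ [(k, r)]) s := by
  simp only [pvGoodB, pvGoodKeyB, pvGoodEntryB, Bool.and_eq_true, List.all_eq_true,
    beq_iff_eq, Bool.not_eq_true', List.contains_eq_mem, decide_eq_false_iff_not,
    decide_eq_true_eq] at hg
  obtain ⟨⟨hkhead, hktail⟩, hentry⟩ := hg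
  have hkheads : ∀ e ∈ tbl, e.1.head? = some '<' := fun e he => (hentry e he).1.1.1.1
  have hpairheads : ∀ e ∈ tbl, e.1.head? = some '<' ∧ e.2.head? = some '<' :=
    fun e he => (hentry e he).1.1.1
  cases hkc : k with
  | nil => rw [hkc] at hkhead; simp at hkhead
  | cons kh kt =>
  subst hkc
  have hkh : kh = '<' := by simpa using hkhead
  subst hkh
  have hktail' : '<' ∉ kt := by simpa using hktail
  suffices hmain : ∀ n s, s.length ≤ n →
      pvScan [('<' :: kt, r)] (pvScan tbl s) = pvScan (tbl ++ [('<' :: kt, r)]) s by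
    intro s; exact hmain s.length s le_rfl
  intro n
  induction n with
  | zero =>
    intro s hs
    have : s = [] := List.eq_nil_of_length_eq_zero (Nat.le_zero.mp hs)
    subst this
    simp [pvScan_nil]
  | succ n ih =>
    intro s hs
    cases s with
    | nil => simp [pvScan_nil]
    | cons c cs =>
    cases hf : pvFindRepl tbl (c :: cs) with
    | some e =>
      obtain ⟨k0, rm⟩ := e
      have hmem : (k0, rm) ∈ tbl := List.mem_of_find?_eq_some hf
      have hrmhead : rm.head? = some '<' := (hentry _ hmem).1.1.1.2
      have hrmtail : '<' ∉ rm.tail := (hentry _ hmem).1.1.2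
      have hlen : ('<' :: kt).length ≤ rm.length := (hentry _ hmem).1.2
      have hnp : ¬ ('<' :: kt) <+: rm := by
        have := (hentry _ hmem).2
        rw [← List.isPrefixOf_iff_prefix]
        simp [this]
      have hf' : pvFindRepl (tbl ++ [('<' :: kt, r)]) (c :: cs) = some (k0, rm) := by
        unfold pvFindRepl at hf ⊢
        rw [List.find?_append, hf]
        rfl
      rw [pvScan_cons_some tbl c cs k0 rm hf,
          pvScan_cons_some _ c cs k0 rm hf']
      rw [pvScan_skip ('<' :: kt) r rm _ rfl hrmhead hrmtail hnp hlen]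
      rw [ih (cs.drop (k0.length - 1)) (by simp [List.length_drop] at hs ⊢; omega)]
    | none =>
      by_cases hkp : ('<' :: kt) <+: (c :: cs)
      · -- the new key matches here
        obtain ⟨hc, hktp⟩ := List.cons_prefix_cons.mp hkp
        subst hc
        obtain ⟨s2, hs2⟩ := hktp
        rw [pvScan_cons_none tbl _ cs hf]
        rw [← hs2]
        rw [pvScan_pass tbl hkheads kt s2 hktail']
        have hf1 : pvFindRepl [('<' :: kt, r)] ('<' :: (kt ++ pvScan tbl s2)) = some ('<' :: kt, r) := by
          apply pvFindRepl_singleton_pos _ _ _ (by simp)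
          rw [List.isPrefixOf_iff_prefix, ← List.cons_append]
          exact List.prefix_append _ _
        have hlen1 : ('<' :: kt).length - 1 = kt.length := by simp
        rw [pvScan_cons_some _ _ _ _ _ hf1, hlen1, List.drop_left]
        rw [ih s2 (by
          have h1 : cs.length ≤ n := by simpa using hs
          have h2 : s2.length ≤ cs.length := by rw [← hs2]; simp
          omega)]
        have hf2 : pvFindRepl (tbl ++ [('<' :: kt, r)]) ('<' :: (kt ++ s2)) = some ('<' :: kt, r) := by
          rw [← hs2] at hf
          unfold pvFindRepl at hf ⊢
          rw [List.find?_append, hf]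
          simp only [Option.none_or, List.find?]
          have hpre : ('<' :: kt).isPrefixOf ('<' :: (kt ++ s2)) = true := by
            rw [List.isPrefixOf_iff_prefix, ← List.cons_append]
            exact List.prefix_append _ _
          simp [hpre]
        rw [pvScan_cons_some _ _ _ _ _ hf2, hlen1, List.drop_left]
      · -- no key matches here
        rw [pvScan_cons_none tbl c cs hf]
        have hnomatch : ¬ ('<' :: kt) <+: (c :: pvScan tbl cs) := by
          by_cases hc : c = '<'
          · subst hc
            intro hcontra
            obtain ⟨-, hcontra'⟩ := List.cons_prefix_cons.mp hcontra
            have hnp' : ¬ kt <+: cs := fun hp => hkp (List.cons_prefix_cons.mpr ⟨rfl, hp⟩)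
            exact pvScan_noMatch tbl hpairheads cs kt hktail' hnp' hcontra'
          · intro hcontra
            exact hc ((List.cons_prefix_cons.mp hcontra).1).symm
        have hf1 : pvFindRepl [('<' :: kt, r)] (c :: pvScan tbl cs) = none := by
          apply pvFindRepl_singleton_neg
          rw [Bool.eq_false_iff]
          intro hc
          exact hnomatch (List.isPrefixOf_iff_prefix.mp hc)
        rw [pvScan_cons_none _ _ _ hf1]
        rw [ih cs (by simpa using hs)]
        have hf2 : pvFindRepl (tbl ++ [('<' :: kt, r)]) (c :: cs) = none := by
          unfold pvFindRepl at hf ⊢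
          rw [List.find?_append, hf]
          simp only [Option.none_or, List.find?]
          have hpre : ('<' :: kt).isPrefixOf (c :: cs) = false := by
            rw [Bool.eq_false_iff]
            intro hc
            exact hkp (List.isPrefixOf_iff_prefix.mp hc)
          simp [hpre]
        rw [pvScan_cons_none _ _ _ hf2]

theorem pvChain (L : List (List Char × List Char)) :
    ∀ T, pvGoodChainB T L = true →
      ∀ s, L.foldl (fun x e => pvScan [e] x) (pvScan T s) = pvScan (T ++ L) s := by
  intro T hT s
  induction L generalizing T s with
  | nil => simp [pvGoodChainB] at *
  | cons e rest ih =>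
    simp only [pvGoodChainB, Bool.and_eq_true] at hT
    obtain ⟨h1, h2⟩ := hT
    simp only [List.foldl_cons]
    rw [pvFuse T e.1 e.2 h1 s]
    have := ih (T ++ [e]) h2 s
    simpa using this

theorem pvScan_table_nil : ∀ s, pvScan [] s = s := by
  intro s
  induction s with
  | nil => exact pvScan_nil []
  | cons c cs ih =>
    rw [pvScan_cons_none [] c cs rfl, ih]

theorem pvFoldReplace (L : List (String × String)) (hL : ∀ p ∈ L, p.1.toList.isEmpty = false) :
    ∀ h : String, (L.foldl (fun h p => PySem.Str.replace h p.1 p.2) h).toList =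
      (L.map (fun p => (p.1.toList, p.2.toList))).foldl (fun x e => pvScan [e] x) h.toList := by
  induction L with
  | nil => simp
  | cons p rest ih =>
    intro h
    simp only [List.foldl_cons, List.map_cons]
    rw [ih (fun q hq => hL q (List.mem_cons_of_mem _ hq))]
    rw [PySem.Str.toList_replace, pvReplace_eq_scan _ _ _ (hL p List.mem_cons_self)]

-- ===== VERDICT (by name: the statement is the Claim_ definition above) =====
set_option maxRecDepth 100000 in
set_option maxHeartbeats 4000000 in
theorem style_markdown_html_spec : Claim_equal_style_markdown_html := by
  intro html _hdom
  unfold Spec_style_markdown_html style_markdown_html_alt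
  conv_lhs => rw [← String.ofList_toList (s := style_markdown_html html)]
  apply congrArg String.ofList
  have hchain := pvChain pvTagTable [] (by decide) html.toList
  rw [pvScan_table_nil] at hchain
  simp only [List.nil_append] at hchain
  simp only [style_markdown_html]
  rw [pvFoldReplace _ (by decide) html]
  have hmap : ([
    ("<h1>", "<h1 style=\"color: #00FFFF; margin: 15px 0 10px 0;\">"),
    ("<h2>", "<h2 style=\"color: #00FFFF; margin: 12px 0 8px 0;\">"),
    ("<h3>", "<h3 style=\"color: #AAAAFF; margin: 10px 0 6px 0;\">"),
    ("<h4>", "<h4 style=\"color: #AAAAFF; margin: 8px 0 4px 0;\">"),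
    ("<h5>", "<h5 style=\"color: #AAAAFF; margin: 6px 0 3px 0;\">"),
    ("<h6>", "<h6 style=\"color: #AAAAFF; margin: 4px 0 2px 0;\">"),
    ("<p>", "<p style=\"color: #00FFFF; margin: 8px 0; line-height: 1.4;\">"),
    ("<li>", "<li style=\"color: #00FFFF; margin: 2px 0;\">"),
    ("<code>", "<code style=\"background-color: #333333; color: #FFFF00; padding: 2px 4px; border-radius: 3px; white-space: pre-wrap; word-wrap: break-word;\">"),
    ("<pre>", "<pre style=\"background-color: #1a1a1a; color: #00FFFF; padding: 10px; border-radius: 5px; border: 1px solid #333333; white-space: pre-wrap; word-wrap: break-word; overflow-x: hidden;\">"),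
    ("<blockquote>", "<blockquote style=\"border-left: 4px solid #0078AA; padding-left: 10px; margin: 10px 0; color: #AAAAFF; font-style: italic;\">"),
    ("<a ", "<a style=\"color: #0078AA; text-decoration: underline;\" "),
    ("<table>", "<table style=\"border-collapse: collapse; margin: 10px 0; color: #00FFFF;\">"),
    ("<th>", "<th style=\"border: 1px solid #333333; padding: 8px; background-color: #333333; color: #FFFF00;\">"),
    ("<td>", "<td style=\"border: 1px solid #333333; padding: 6px;\">"),
    ("<hr>", "<hr style=\"border: none; border-top: 2px solid #333333; margin: 15px 0;\">")] : List (String × String)).map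
      (fun p => (p.1.toList, p.2.toList)) = pvTagTable := by decide
  rw [hmap, hchain]
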